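-- pv_equiv track=rewrite | github.com/kamalesh346/BhoomiAI | agents/orchestrator.py | _pick_option
-- ===== SOURCE A (Python) =====
-- def _pick_option(ranked, crop_map, budget, inv_pref="any", risk_pref="any",
--                  market_scores=None, sustain_scores=None,
--                  prefer_sustain=False, exclude=None):
--     """Pick best crop matching criteria."""
--     exclude = exclude or []
--     inv_order = {"low": 0, "medium": 1, "high": 2}
--
--     for name, score in ranked:
--         if name in exclude or name not in crop_map:
--             continue
--         crop = crop_map[name]
--
--         if inv_pref != "any":
--             crop_inv = crop.get("investment", "medium")
--             if inv_pref == "low" and inv_order.get(crop_inv, 1) > 1: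
--                 continue
--
--         if risk_pref == "low" and crop.get("risk", "medium") == "high":
--             continue
--
--         if risk_pref == "high" and crop.get("risk", "medium") == "low":
--             continue
--
--         return name
--
--     # Fallback: top ranked non-excluded
--     for name, _ in ranked:
--         if name not in exclude and name in crop_map:
--             return name
--
--     return ranked[0][0] if ranked else "Rice"
-- ===== SOURCE B (Python) =====
-- def _pick_option(ranked, crop_map, budget, inv_pref="any", risk_pref="any",
--                  market_scores=None, sustain_scores=None,
--                  prefer_sustain=False, exclude=None):
--     """Score every ranked crop (0 = full preference match, 1 = eligible but
--     filtered, 2 = excluded/unknown), then return the earliest best-scored one."""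
--     if not ranked:
--         return "Rice"
--     excluded = set(exclude or [])
--
--     def category(name):
--         if name in excluded or name not in crop_map:
--             return 2
--         crop = crop_map[name]
--         if inv_pref == "low" and crop.get("investment", "medium") == "high":
--             return 1
--         risk = crop.get("risk", "medium")
--         if (risk_pref == "low" and risk == "high") or \
--            (risk_pref == "high" and risk == "low"):
--             return 1
--         return 0
--
--     cats = [category(name) for name, _ in ranked]
--     return ranked[cats.index(min(cats))][0]
-- ===== Notes on version B (the rewrite author's own statement) =====
-- stated objective: alternative
-- what changed: Replaces A's two sequential early-return scans plus final fallback by a score-and-argmin algorithm: every ranked crop is assigned a category (0 full match, 1 eligible but filtered, 2 excluded/unknown) in one mapping pass and the result is ranked[cats.index(min(cats))][0]; the return-priority order is encoded in the scores instead of in control flow, and exclusion is tested against a set instead of a list.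
import Mathlib
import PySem

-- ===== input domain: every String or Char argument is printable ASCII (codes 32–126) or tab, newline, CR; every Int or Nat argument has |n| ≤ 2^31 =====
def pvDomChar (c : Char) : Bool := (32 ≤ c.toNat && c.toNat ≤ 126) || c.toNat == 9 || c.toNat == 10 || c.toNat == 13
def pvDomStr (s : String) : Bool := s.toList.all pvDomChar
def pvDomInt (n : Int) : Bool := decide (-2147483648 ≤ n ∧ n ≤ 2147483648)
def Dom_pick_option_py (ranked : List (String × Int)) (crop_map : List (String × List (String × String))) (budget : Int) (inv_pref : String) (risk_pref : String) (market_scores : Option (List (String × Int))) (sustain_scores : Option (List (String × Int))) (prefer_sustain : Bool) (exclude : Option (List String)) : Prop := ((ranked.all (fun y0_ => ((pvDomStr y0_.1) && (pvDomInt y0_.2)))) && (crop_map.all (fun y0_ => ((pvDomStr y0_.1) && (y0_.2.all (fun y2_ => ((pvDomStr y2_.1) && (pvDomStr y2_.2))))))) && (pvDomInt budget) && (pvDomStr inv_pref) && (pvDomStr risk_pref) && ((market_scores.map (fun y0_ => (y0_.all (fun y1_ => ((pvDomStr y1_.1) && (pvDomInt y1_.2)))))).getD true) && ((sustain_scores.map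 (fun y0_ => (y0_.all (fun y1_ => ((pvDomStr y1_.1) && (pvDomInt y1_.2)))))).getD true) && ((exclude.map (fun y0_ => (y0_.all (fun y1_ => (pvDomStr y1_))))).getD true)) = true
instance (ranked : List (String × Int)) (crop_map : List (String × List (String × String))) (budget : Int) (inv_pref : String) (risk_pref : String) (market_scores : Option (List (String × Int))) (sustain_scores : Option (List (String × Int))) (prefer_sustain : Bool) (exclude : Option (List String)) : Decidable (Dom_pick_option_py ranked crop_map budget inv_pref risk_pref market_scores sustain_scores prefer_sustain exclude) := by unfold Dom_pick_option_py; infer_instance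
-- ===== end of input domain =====

-- B replaces A's two sequential early-return scans plus fallback by a score-and-argmin
-- algorithm: each crop gets a category (0/1/2) and the earliest best-scored crop is
-- returned, with set-based exclusion lookup (objective: alternative).

-- ===== PORT A =====
-- inv_order = {"low": 0, "medium": 1, "high": 2}  (dict literal, distinct keys)
def pvInvOrder : PySem.Dict String Int :=
  PySem.Dict.mk [("low", 0), ("medium", 1), ("high", 2)]

-- first loop of A: return the first non-excluded, known crop passing all filters
def pickA_loop1 (ranked : List (String × Int)) (cm : PySem.Dict String (PySem.Dict String String))
    (inv_pref risk_pref : String) (exclude : List String) : Option String :=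
  match ranked with
  | [] => none
  | (name, _score) :: rest =>
    if exclude.contains name || !(cm.contains name) then
      pickA_loop1 rest cm inv_pref risk_pref exclude
    else
      let crop := (cm.get? name).getD PySem.Dict.empty  -- crop_map[name]; contains holds here
      if (inv_pref != "any") && ((inv_pref == "low") &&
          ((pvInvOrder.get? (crop.getD "investment" "medium")).getD 1 > 1)) then
        pickA_loop1 rest cm inv_pref risk_pref exclude
      else if (risk_pref == "low") && (crop.getD "risk" "medium" == "high") then
        pickA_loop1 rest cm inv_pref risk_pref exclude
      else if (risk_pref == "high") && (crop.getD "risk" "medium" == "low") then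
        pickA_loop1 rest cm inv_pref risk_pref exclude
      else
        some name

-- second loop of A: top ranked non-excluded crop present in crop_map
def pickA_loop2 (ranked : List (String × Int)) (cm : PySem.Dict String (PySem.Dict String String))
    (exclude : List String) : Option String :=
  match ranked with
  | [] => none
  | (name, _) :: rest =>
    if !(exclude.contains name) && cm.contains name then some name
    else pickA_loop2 rest cm exclude

def pick_option_py (ranked : List (String × Int)) (crop_map : List (String × List (String × String))) (budget : Int) (inv_pref : String) (risk_pref : String) (market_scores : Option (List (String × Int))) (sustain_scores : Option (List (String × Int))) (prefer_sustain : Bool) (exclude : Option (List String)) : String :=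
  let excludeL := exclude.getD []  -- 'exclude = exclude or []' (None and [] both give [])
  let cm := PySem.Dict.ofList (crop_map.map (fun p => (p.1, PySem.Dict.ofList p.2)))
  match pickA_loop1 ranked cm inv_pref risk_pref excludeL with
  | some n => n
  | none =>
    match pickA_loop2 ranked cm excludeL with
    | some n => n
    | none => match ranked with | [] => "Rice" | (n, _) :: _ => n

-- ===== PORT B =====
-- B's category: 0 = full preference match, 1 = eligible but filtered, 2 = excluded/unknown
def pvCategory (cm : PySem.Dict String (PySem.Dict String String)) (excluded : PySem.Set String)
    (inv_pref risk_pref : String) (name : String) : Int :=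
  if PySem.Set.contains excluded name || !(cm.contains name) then 2
  else
    let crop := (cm.get? name).getD PySem.Dict.empty
    if (inv_pref == "low") && (crop.getD "investment" "medium" == "high") then 1
    else
      let risk := crop.getD "risk" "medium"
      if ((risk_pref == "low") && (risk == "high")) || ((risk_pref == "high") && (risk == "low")) then 1
      else 0

def pick_option_py_alt (ranked : List (String × Int)) (crop_map : List (String × List (String × String))) (budget : Int) (inv_pref : String) (risk_pref : String) (market_scores : Option (List (String × Int))) (sustain_scores : Option (List (String × Int))) (prefer_sustain : Bool) (exclude : Option (List String)) : String :=
  match ranked with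
  | [] => "Rice"
  | _ :: _ =>
    let excluded := PySem.Set.ofList (exclude.getD [])
    let cm := PySem.Dict.ofList (crop_map.map (fun p => (p.1, PySem.Dict.ofList p.2)))
    -- cats = [category(name) for name, _ in ranked]
    let cats := ranked.map (fun p => pvCategory cm excluded inv_pref risk_pref p.1)
    -- ranked[cats.index(min(cats))][0]  (min/index/[] always succeed: cats is nonempty
    -- and contains its minimum; the defaults below are unreachable)
    let m := (PySem.List.min? cats (fun x => x)).getD 0
    let idx := ((PySem.List.index? cats m).getD 0 : Nat)
    ((PySem.List.pyGet? ranked (idx : Int)).getD ("Rice", 0)).1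

-- ===== PRECONDITION & SPEC =====
def Spec_pick_option_py (ranked : List (String × Int)) (crop_map : List (String × List (String × String))) (budget : Int) (inv_pref : String) (risk_pref : String) (market_scores : Option (List (String × Int))) (sustain_scores : Option (List (String × Int))) (prefer_sustain : Bool) (exclude : Option (List String)) (out : String) : Prop := out = pick_option_py_alt ranked crop_map budget inv_pref risk_pref market_scores sustain_scores prefer_sustain exclude
instance (ranked : List (String × Int)) (crop_map : List (String × List (String × String))) (budget : Int) (inv_pref : String) (risk_pref : String) (market_scores : Option (List (String × Int))) (sustain_scores : Option (List (String × Int))) (prefer_sustain : Bool) (exclude : Option (List String)) (out : String) : Decidable (Spec_pick_option_py ranked crop_map budget inv_pref risk_pref market_scores sustain_scores prefer_sustain exclude out) := by unfold Spec_pick_option_py; infer_instance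

-- ===== CLAIM (what is proved, stated in full; the proofs are below) =====
def Claim_equal_pick_option_py : Prop := ∀ (ranked : List (String × Int)) (crop_map : List (String × List (String × String))) (budget : Int) (inv_pref : String) (risk_pref : String) (market_scores : Option (List (String × Int))) (sustain_scores : Option (List (String × Int))) (prefer_sustain : Bool) (exclude : Option (List String)), Dom_pick_option_py ranked crop_map budget inv_pref risk_pref market_scores sustain_scores prefer_sustain exclude → Spec_pick_option_py ranked crop_map budget inv_pref risk_pref market_scores sustain_scores prefer_sustain exclude (pick_option_py ranked crop_map budget inv_pref risk_pref market_scores sustain_scores prefer_sustain exclude)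

-- ===== LEMMAS AND PROOFS =====

-- A's table test 'inv_order.get(ci, 1) > 1' is exactly 'ci == "high"'
lemma invOrder_gt_one (ci : String) :
    (decide ((pvInvOrder.get? ci).getD 1 > 1)) = (ci == "high") := by
  by_cases h3 : ci = "high"
  · subst h3; decide
  · have e3 : (ci == "high") = false := by simp [h3]
    rw [e3]
    simp only [pvInvOrder, PySem.Dict.get?, List.find?]
    by_cases h1 : ci = "low"
    · subst h1; decide
    · by_cases h2 : ci = "medium"
      · subst h2; decide
      · have l : (("low" : String) == ci) = false := by simp [Ne.symm h1]
        have m : (("medium" : String) == ci) = false := by simp [Ne.symm h2]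
        have h : (("high" : String) == ci) = false := by simp [Ne.symm h3]
        simp [l, m, h]

-- set(exclude) membership is list membership
lemma setOfList_contains (xs : List String) (x : String) :
    PySem.Set.contains (PySem.Set.ofList xs) x = xs.contains x := by
  by_cases h : x ∈ xs <;>
    simp_all [PySem.Set.contains_eq_listContains, PySem.Set.mem_ofList]

-- the category takes only the values 0, 1, 2
lemma cat_range (cm : PySem.Dict String (PySem.Dict String String)) (ex : PySem.Set String)
    (ip rp name : String) :
    pvCategory cm ex ip rp name = 0 ∨ pvCategory cm ex ip rp name = 1 ∨
      pvCategory cm ex ip rp name = 2 := by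
  simp only [pvCategory]; split_ifs <;> simp

-- category 2 exactly on excluded/unknown crops
lemma cat_eq_two_iff (cm : PySem.Dict String (PySem.Dict String String)) (excl : List String)
    (ip rp name : String) :
    pvCategory cm (PySem.Set.ofList excl) ip rp name = 2 ↔
      (excl.contains name || !(cm.contains name)) = true := by
  simp only [pvCategory]
  rw [setOfList_contains]
  split_ifs with h1 h2 h3 <;> simpa using h1

-- find? is determined by the predicate's values on the list
lemma find?_ext {α : Type} (l : List α) (p q : α → Bool) (h : ∀ a ∈ l, p a = q a) :
    l.find? p = l.find? q := by
  induction l with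
  | nil => rfl
  | cons hd tl ih =>
    have hh := h hd (by simp)
    simp only [List.find?]
    rw [hh]
    cases q hd
    · exact ih (fun a ha => h a (by simp [ha]))
    · rfl

-- A's first loop finds the first crop of category 0
lemma loop1_eq_find (l : List (String × Int)) (cm : PySem.Dict String (PySem.Dict String String))
    (ip rp : String) (excl : List String) :
    pickA_loop1 l cm ip rp excl =
      (l.find? (fun p => pvCategory cm (PySem.Set.ofList excl) ip rp p.1 == 0)).map (·.1) := by
  induction l with
  | nil => rfl
  | cons hd tl ih =>
    obtain ⟨name, score⟩ := hd
    simp only [pickA_loop1, List.find?]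
    have hcat : pvCategory cm (PySem.Set.ofList excl) ip rp name =
        if (excl.contains name || !(cm.contains name)) then 2
        else if ((ip != "any") && ((ip == "low") &&
              (decide ((pvInvOrder.get? (((cm.get? name).getD PySem.Dict.empty).getD "investment" "medium")).getD 1 > 1)))) ||
            ((rp == "low") && (((cm.get? name).getD PySem.Dict.empty).getD "risk" "medium" == "high")) ||
            ((rp == "high") && (((cm.get? name).getD PySem.Dict.empty).getD "risk" "medium" == "low")) then 1
        else 0 := by
      simp only [pvCategory]
      rw [setOfList_contains, invOrder_gt_one]
      by_cases hl : ip = "low"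
      · subst hl
        split_ifs <;> simp_all [beq_eq_decide] <;> tauto
      · have e : (ip == "low") = false := by simp [hl]
        rw [e]
        split_ifs <;> simp_all [beq_eq_decide] <;> tauto
    cases hc1 : (excl.contains name || !(cm.contains name))
    · -- present and not excluded: split on the filter tests
      rw [hc1] at hcat
      simp only [Bool.false_eq_true, if_false] at hcat
      cases ht1 : ((ip != "any") && ((ip == "low") &&
            (decide ((pvInvOrder.get? (((cm.get? name).getD PySem.Dict.empty).getD "investment" "medium")).getD 1 > 1)))) <;>
      cases ht2 : ((rp == "low") && (((cm.get? name).getD PySem.Dict.empty).getD "risk" "medium" == "high")) <;>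
      cases ht3 : ((rp == "high") && (((cm.get? name).getD PySem.Dict.empty).getD "risk" "medium" == "low")) <;>
        simp [hc1, ht1, ht2, ht3] at hcat ⊢ <;> simp [hcat, ih]
    · rw [hc1] at hcat
      simp only [if_true] at hcat
      have hb : (pvCategory cm (PySem.Set.ofList excl) ip rp name == 0) = false := by
        simp [hcat]
      simp [hc1, hb, ih]

-- A's second loop finds the first crop of category ≠ 2
lemma loop2_eq_find (l : List (String × Int)) (cm : PySem.Dict String (PySem.Dict String String))
    (ip rp : String) (excl : List String) :
    pickA_loop2 l cm excl =
      (l.find? (fun p => !(pvCategory cm (PySem.Set.ofList excl) ip rp p.1 == 2))).map (·.1) := by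
  induction l with
  | nil => rfl
  | cons hd tl ih =>
    obtain ⟨name, score⟩ := hd
    simp only [pickA_loop2, List.find?]
    have h2 := cat_eq_two_iff cm excl ip rp name
    cases hc : (excl.contains name || !(cm.contains name))
    · have hne : ¬ pvCategory cm (PySem.Set.ofList excl) ip rp name = 2 := by
        intro h; rw [h2] at h; rw [h] at hc; cases hc
      have hcond : (!(excl.contains name) && cm.contains name) = true := by
        rcases Bool.or_eq_false_iff.mp hc with ⟨ha, hb⟩
        simp only [ha, Bool.not_false, Bool.true_and]
        simpa using hb
      have hb : (!(pvCategory cm (PySem.Set.ofList excl) ip rp name == 2)) = true := by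
        simp [hne]
      simp only [hcond, hb]
      rfl
    · have hcat2 : pvCategory cm (PySem.Set.ofList excl) ip rp name = 2 := h2.mpr hc
      have hcond : (!(excl.contains name) && cm.contains name) = false := by
        rcases (by simpa using hc : name ∈ excl ∨ cm.contains name = false) with h | h
        · have hx : excl.contains name = true := by simpa using h
          simp only [hx, Bool.not_true, Bool.false_and]
        · simp [h]
      have hb : (!(pvCategory cm (PySem.Set.ofList excl) ip rp name == 2)) = false := by
        simp [hcat2]
      simp only [hcond, hb]
      exact ih

-- B's index-of-minimum lookup returns the first element whose key equals m
lemma index_pyGet (l : List (String × Int)) (f : String × Int → Int) (m : Int) (p : String × Int)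
    (hfind : l.find? (fun x => f x == m) = some p) :
    PySem.List.pyGet? l ((((PySem.List.index? (l.map f) m).getD 0 : Nat) : Int)) = some p := by
  induction l with
  | nil => simp at hfind
  | cons hd tl ih =>
    simp only [List.find?] at hfind
    by_cases hh : f hd = m
    · have hb : (f hd == m) = true := by simp [hh]
      rw [hb] at hfind
      have hp : hd = p := by simpa using hfind
      have hidx : PySem.List.index? ((hd :: tl).map f) m = some 0 := by
        simp only [List.map_cons]; rw [hh]; exact PySem.List.index?_cons_self _ _
      subst hp
      rw [hidx]
      simp [PySem.List.pyGet?_zero_cons]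
    · have hb : (f hd == m) = false := by simp [hh]
      rw [hb] at hfind
      have ihh := ih hfind
      have hpmem : p ∈ tl := List.mem_of_find?_eq_some hfind
      have hfp : f p = m := by have := List.find?_some hfind; simpa using this
      have hmem : m ∈ tl.map f := List.mem_map.mpr ⟨p, hpmem, hfp⟩
      obtain ⟨k, hk⟩ : ∃ k, PySem.List.index? (tl.map f) m = some k := by
        have hs := (PySem.List.index?_isSome_iff (tl.map f) m).mpr hmem
        exact Option.isSome_iff_exists.mp hs
      have hidx : PySem.List.index? ((hd :: tl).map f) m = some (k + 1) := by
        simp only [List.map_cons]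
        rw [PySem.List.index?_cons_of_ne, hk]
        · rfl
        · exact hh
      rw [hidx]
      rw [hk] at ihh
      simp only [Option.getD_some] at ihh ⊢
      have hcast : (((k + 1 : Nat)) : Int) = ((k : Nat) : Int) + 1 := by push_cast; ring
      rw [hcast, PySem.List.pyGet?_cons_succ]
      exact ihh

-- ===== VERDICT (by name: the statement is the Claim_ definition above) =====
theorem pick_option_py_spec : Claim_equal_pick_option_py := by
  intro ranked crop_map budget ip rp ms ss ps exclude _hd
  unfold Spec_pick_option_py pick_option_py pick_option_py_alt
  cases ranked with
  | nil => simp [pickA_loop1, pickA_loop2]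
  | cons hd tl =>
    simp only []
    set excl := exclude.getD [] with hexcl
    set cm := PySem.Dict.ofList (crop_map.map (fun p => (p.1, PySem.Dict.ofList p.2))) with hcm
    set f : String × Int → Int := fun p => pvCategory cm (PySem.Set.ofList excl) ip rp p.1 with hf
    set cats := (hd :: tl).map f with hcats
    obtain ⟨m, hm⟩ : ∃ m, PySem.List.min? cats (fun x => x) = some m := by
      rcases ho : PySem.List.min? cats (fun x => x) with _ | m
      · rw [PySem.List.min?_eq_none_iff] at ho; simp [hcats] at ho
      · exact ⟨m, rfl⟩
    have hmem : m ∈ cats := PySem.List.min?_mem hm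
    have hmin : ∀ y ∈ cats, m ≤ y := fun y hy => PySem.List.min?_isMin hm y hy
    obtain ⟨pm, hpmmem, hpmf⟩ := List.mem_map.mp hmem
    have hrange : ∀ q : String × Int, q ∈ hd :: tl → f q = 0 ∨ f q = 1 ∨ f q = 2 := by
      intro q _; exact cat_range cm (PySem.Set.ofList excl) ip rp q.1
    have hm012 : m = 0 ∨ m = 1 ∨ m = 2 := by
      rw [← hpmf]; exact hrange pm hpmmem
    rw [loop1_eq_find _ cm ip rp excl, loop2_eq_find _ cm ip rp excl, hm]
    simp only [Option.getD_some]
    rcases hm012 with h0 | h1 | h2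
    · -- minimum 0: A's first loop fires; B picks the first category-0 crop
      subst h0
      obtain ⟨p0, hp0⟩ : ∃ p0, (hd :: tl).find? (fun x => f x == 0) = some p0 := by
        have : ((hd :: tl).find? (fun x => f x == 0)).isSome := by
          rw [List.find?_isSome]; exact ⟨pm, hpmmem, by simp [hpmf]⟩
        exact Option.isSome_iff_exists.mp this
      rw [hf] at hp0
      rw [hp0]
      have := index_pyGet (hd :: tl) f 0 p0 (by rw [hf]; exact hp0)
      rw [hcats] at *
      rw [this]
      simp
    · -- minimum 1: no full match; A's second loop = first category-1 crop
      subst h1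
      have hno0 : (hd :: tl).find? (fun x => pvCategory cm (PySem.Set.ofList excl) ip rp x.1 == 0) = none := by
        rw [List.find?_eq_none]
        intro x hx
        have := hmin (f x) (List.mem_map.mpr ⟨x, hx, rfl⟩)
        simp only [hf] at this ⊢
        intro hc
        rw [beq_iff_eq] at hc
        omega
      rw [hno0]
      have hext : (hd :: tl).find? (fun x => !(pvCategory cm (PySem.Set.ofList excl) ip rp x.1 == 2)) =
          (hd :: tl).find? (fun x => f x == 1) := by
        apply find?_ext
        intro a ha
        have hr := hrange a ha
        have hge := hmin (f a) (List.mem_map.mpr ⟨a, ha, rfl⟩)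
        simp only [hf] at hr hge ⊢
        rcases hr with h | h | h <;> rw [h] <;> simp <;> omega
      rw [hext]
      obtain ⟨p1, hp1⟩ : ∃ p1, (hd :: tl).find? (fun x => f x == 1) = some p1 := by
        have : ((hd :: tl).find? (fun x => f x == 1)).isSome := by
          rw [List.find?_isSome]; exact ⟨pm, hpmmem, by simp [hpmf]⟩
        exact Option.isSome_iff_exists.mp this
      rw [hp1]
      have := index_pyGet (hd :: tl) f 1 p1 hp1
      rw [hcats] at *
      rw [this]
      simp
    · -- minimum 2: everything excluded/unknown; A falls back to ranked[0][0], and the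
      -- first category-2 crop is the head
      subst h2
      have hall2 : ∀ x ∈ hd :: tl, f x = 2 := by
        intro x hx
        have hge := hmin (f x) (List.mem_map.mpr ⟨x, hx, rfl⟩)
        rcases hrange x hx with h | h | h <;> omega
      have hno0 : (hd :: tl).find? (fun x => pvCategory cm (PySem.Set.ofList excl) ip rp x.1 == 0) = none := by
        rw [List.find?_eq_none]
        intro x hx
        have := hall2 x hx
        simp only [hf] at this
        simp [this]
      have hno12 : (hd :: tl).find? (fun x => !(pvCategory cm (PySem.Set.ofList excl) ip rp x.1 == 2)) = none := by
        rw [List.find?_eq_none]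
        intro x hx
        have := hall2 x hx
        simp only [hf] at this
        simp [this]
      rw [hno0, hno12]
      have hfindhd : (hd :: tl).find? (fun x => f x == 2) = some hd := by
        have := hall2 hd (by simp)
        simp [List.find?, this]
      have := index_pyGet (hd :: tl) f 2 hd hfindhd
      rw [hcats] at *
      rw [this]
      simp
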